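-- pv_equiv track=rewrite | github.com/akikuno/DAJIN2 | src/DAJIN2/core/preprocess/alignment/midsv_caller.py | convert_consecutive_indels_to_match
-- ===== SOURCE A (Python) =====
-- def convert_consecutive_indels_to_match(cssplit: str) -> str:
--     i = 0
--     cssplit_reversed = cssplit.split(",")[::-1]
--     while i < len(cssplit_reversed):
--         current_cs = cssplit_reversed[i]
--
--         if not current_cs.startswith("+"):
--             i += 1
--             continue
--
--         insertions = [base.lstrip("+") for base in current_cs.split("|")[:-1]][::-1]
--
--         # Extract deletions
--         deletions = []
--
--         for j in range(1, len(insertions) + 1):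
--             if i + j >= len(cssplit_reversed):
--                 break
--
--             next_cs = cssplit_reversed[i + j]
--
--             if not next_cs.startswith("-"):
--                 break
--
--             deletions.append(next_cs.lstrip("-"))
--
--         if insertions != deletions:
--             i += 1
--             continue
--
--         # Format insertions
--         cssplit_reversed[i] = current_cs.split("|")[-1]
--
--         # Format deletions
--         for k, _ in enumerate(insertions, 1):
--             cssplit_reversed[i + k] = cssplit_reversed[i + k].replace("-", "=")
--
--         i += len(insertions) + 1
--
--     return ",".join(cssplit_reversed[::-1])
-- ===== SOURCE B (Python) =====
-- def convert_consecutive_indels_to_match(cssplit: str) -> str: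
--     # Forward, per-position functional rewrite: each token's output is decided
--     # independently from the ORIGINAL token list (no mutation, no reversal).
--     toks = cssplit.split(",")
--     n = len(toks)
--
--     def ins_bases(q):
--         return [s.lstrip("+") for s in toks[q].split("|")[:-1]]
--
--     def is_collapsing(q):
--         if not toks[q].startswith("+"):
--             return False
--         bases = ins_bases(q)
--         m = len(bases)
--         return q >= m and all(
--             toks[q - m + k].startswith("-") and toks[q - m + k].lstrip("-") == bases[k]
--             for k in range(m)
--         )
--
--     def render(p):
--         tok = toks[p]
--         if is_collapsing(p):
--             return tok.split("|")[-1]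
--         if tok.startswith("-"):
--             q = p
--             while q < n and toks[q].startswith("-"):
--                 q += 1
--             if q < n and is_collapsing(q) and len(ins_bases(q)) >= q - p:
--                 return tok.replace("-", "=")
--         return tok
--
--     return ",".join(render(p) for p in range(n))
-- ===== Notes on version B (the rewrite author's own statement) =====
-- stated objective: simpler
-- what changed: A's reversed in-place while-loop with lookahead and index jumps is replaced by a single forward pass that renders each token independently from the original token list (insertion/deletion blocks cannot overlap, so per-position decisions are order-free).
import Mathlib
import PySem

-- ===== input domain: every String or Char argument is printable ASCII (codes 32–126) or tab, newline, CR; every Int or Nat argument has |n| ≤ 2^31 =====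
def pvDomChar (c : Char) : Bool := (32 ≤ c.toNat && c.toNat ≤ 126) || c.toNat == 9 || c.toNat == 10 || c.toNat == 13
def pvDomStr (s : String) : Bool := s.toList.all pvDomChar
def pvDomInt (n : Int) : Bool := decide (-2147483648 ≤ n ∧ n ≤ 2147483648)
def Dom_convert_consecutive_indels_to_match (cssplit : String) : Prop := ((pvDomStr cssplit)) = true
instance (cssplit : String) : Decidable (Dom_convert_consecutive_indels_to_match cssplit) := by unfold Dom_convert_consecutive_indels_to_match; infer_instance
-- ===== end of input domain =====

-- B replaces A's reversed in-place while-loop by a single forward pass that renders each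
-- token independently from the original token list (objective: simpler).

-- shared helper: exact port of Python's s.lstrip(c) for a single strip character c
def pvLstrip (c : Char) (s : List Char) : List Char := s.dropWhile (· == c)

-- ===== PORT A =====

-- port of A's inner `for j in range(1, len(insertions)+1)` deletion-collecting loop (with its two breaks)
def pvCollectDels (l : List (List Char)) (pos : Nat) (m : Nat) : List (List Char) :=
  match m with
  | 0 => []
  | Nat.succ m' =>
    if pos < l.length then
      let nx := l.getD pos []
      if PySem.Chars.startswith nx ['-'] then pvLstrip '-' nx :: pvCollectDels l (pos+1) m'
      else []
    else []

-- port of A's `for k, _ in enumerate(insertions, 1)` rewrite loop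
def pvFormatDels (l : List (List Char)) (pos : Nat) (m : Nat) : List (List Char) :=
  match m with
  | 0 => l
  | Nat.succ m' =>
      pvFormatDels (l.set pos (PySem.Chars.replace (l.getD pos []) ['-'] ['='])) (pos+1) m'

theorem pvFormatDels_length (m : Nat) : ∀ (l : List (List Char)) (pos : Nat),
    (pvFormatDels l pos m).length = l.length := by
  induction m with
  | zero => intro l pos; rfl
  | succ m ih => intro l pos; simp [pvFormatDels, ih]

-- port of A's `while i < len(cssplit_reversed)` loop
def pvALoop (l : List (List Char)) (i : Nat) : List (List Char) :=
  if h : i < l.length then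
    let current := l.getD i []
    if PySem.Chars.startswith current ['+'] = false then
      pvALoop l (i+1)
    else
      let ins := (((PySem.Chars.splitOn current ['|']).dropLast).map (pvLstrip '+')).reverse
      let dels := pvCollectDels l (i+1) ins.length
      if ins ≠ dels then pvALoop l (i+1)
      else
        let l1 := l.set i ((PySem.Chars.splitOn current ['|']).getLastD [])
        let l2 := pvFormatDels l1 (i+1) ins.length
        pvALoop l2 (i + ins.length + 1)
  else l
termination_by l.length - i
decreasing_by
  · omega
  · omega
  · simp [pvFormatDels_length]; omega

def convert_consecutive_indels_to_match (cssplit : String) : String :=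
  let cssplit_reversed := (PySem.Chars.splitOn cssplit.toList [',']).reverse
  String.mk (PySem.Chars.join [','] ((pvALoop cssplit_reversed 0).reverse))

-- ===== PORT B =====

def pvInsBases (toks : List (List Char)) (q : Nat) : List (List Char) :=
  ((PySem.Chars.splitOn (toks.getD q []) ['|']).dropLast).map (pvLstrip '+')

def pvIsCollapsing (toks : List (List Char)) (q : Nat) : Bool :=
  if PySem.Chars.startswith (toks.getD q []) ['+'] = false then false
  else
    let bases := pvInsBases toks q
    let m := bases.length
    decide (m ≤ q) && (List.range m).all (fun k =>
      PySem.Chars.startswith (toks.getD (q - m + k) []) ['-'] &&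
      (pvLstrip '-' (toks.getD (q - m + k) []) == bases.getD k []))

def pvDelRunEnd (toks : List (List Char)) (q : Nat) : Nat :=
  if h : q < toks.length ∧ PySem.Chars.startswith (toks.getD q []) ['-'] = true then
    pvDelRunEnd toks (q+1)
  else q
termination_by toks.length - q
decreasing_by omega

def pvRender (toks : List (List Char)) (p : Nat) : List Char :=
  let tok := toks.getD p []
  if pvIsCollapsing toks p then (PySem.Chars.splitOn tok ['|']).getLastD []
  else if PySem.Chars.startswith tok ['-'] then
    let q := pvDelRunEnd toks p
    if q < toks.length ∧ pvIsCollapsing toks q = true ∧ q - p ≤ (pvInsBases toks q).length then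
      PySem.Chars.replace tok ['-'] ['=']
    else tok
  else tok

def convert_consecutive_indels_to_match_alt (cssplit : String) : String :=
  let toks := PySem.Chars.splitOn cssplit.toList [',']
  String.mk (PySem.Chars.join [','] ((List.range toks.length).map (pvRender toks)))

-- ===== PRECONDITION & SPEC =====
def Spec_convert_consecutive_indels_to_match (cssplit : String) (out : String) : Prop := out = convert_consecutive_indels_to_match_alt cssplit
instance (cssplit : String) (out : String) : Decidable (Spec_convert_consecutive_indels_to_match cssplit out) := by unfold Spec_convert_consecutive_indels_to_match; infer_instance

-- ===== CLAIM (what is proved, stated in full; the proofs are below) =====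
def Claim_equal_convert_consecutive_indels_to_match : Prop := ∀ (cssplit : String), Dom_convert_consecutive_indels_to_match cssplit → Spec_convert_consecutive_indels_to_match cssplit (convert_consecutive_indels_to_match cssplit)

-- ===== LEMMAS AND PROOFS =====

-- "no matching insertion block ends at or beyond reversed index i"
def pvNS (T : List (List Char)) (i : Nat) : Prop :=
  ∀ j, j < i → pvIsCollapsing T (T.length - 1 - j) = true →
    j + (pvInsBases T (T.length - 1 - j)).length < i

theorem pv_sw_exclusive (s : List Char) (a b : Char) (hne : b ≠ a)
    (h : PySem.Chars.startswith s [a] = true) :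
    PySem.Chars.startswith s [b] = false := by
  rw [PySem.Chars.startswith_iff] at h
  rcases h with ⟨t, rfl⟩
  rw [Bool.eq_false_iff]
  intro hb
  rw [PySem.Chars.startswith_iff] at hb
  rcases hb with ⟨u, hu⟩
  simp at hu
  exact hne hu.1

theorem pv_sw_nil (c : Char) : PySem.Chars.startswith [] [c] = false := by
  rw [Bool.eq_false_iff]
  intro h
  rw [PySem.Chars.startswith_iff] at h
  simp at h

theorem pv_ncol_of_nplus (T : List (List Char)) (p : Nat)
    (h : PySem.Chars.startswith (T.getD p []) ['+'] = false) :
    pvIsCollapsing T p = false := by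
  unfold pvIsCollapsing
  rw [if_pos h]

theorem pvIsCollapsing_lt (T : List (List Char)) (p : Nat)
    (h : pvIsCollapsing T p = true) :
    p < T.length ∧ PySem.Chars.startswith (T.getD p []) ['+'] = true := by
  by_cases hp : PySem.Chars.startswith (T.getD p []) ['+'] = true
  · refine ⟨?_, hp⟩
    by_contra hlen
    rw [List.getD_eq_default _ _ (by omega)] at hp
    rw [pv_sw_nil] at hp
    exact Bool.false_ne_true hp
  · rw [pv_ncol_of_nplus T p (by simpa using hp)] at h
    exact absurd h (by simp)

theorem pvIsCollapsing_iff (T : List (List Char)) (p : Nat)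
    (hp : PySem.Chars.startswith (T.getD p []) ['+'] = true) :
    pvIsCollapsing T p = true ↔
      (pvInsBases T p).length ≤ p ∧
      ∀ k, k < (pvInsBases T p).length →
        PySem.Chars.startswith (T.getD (p - (pvInsBases T p).length + k) []) ['-'] = true ∧
        pvLstrip '-' (T.getD (p - (pvInsBases T p).length + k) []) = (pvInsBases T p).getD k [] := by
  unfold pvIsCollapsing
  rw [if_neg (by rw [hp]; simp)]
  simp only [Bool.and_eq_true, decide_eq_true_iff, List.all_eq_true, List.mem_range, beq_iff_eq]

theorem pvCollectDels_eq (m : Nat) : ∀ (l : List (List Char)) (pos : Nat),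
    (∀ j, j < m → pos + j < l.length ∧
      PySem.Chars.startswith (l.getD (pos + j) []) ['-'] = true) →
    pvCollectDels l pos m = (List.range m).map (fun j => pvLstrip '-' (l.getD (pos + j) [])) := by
  induction m with
  | zero => intro l pos _; rfl
  | succ m ih =>
    intro l pos h
    have h0 := h 0 (by omega)
    rw [pvCollectDels]
    rw [if_pos (by omega)]
    rw [if_pos (by simpa using h0.2)]
    rw [ih l (pos + 1) (fun j hj => by
      have := h (j + 1) (by omega)
      rw [show pos + 1 + j = pos + (j + 1) from by omega]
      exact this)]
    rw [List.range_succ_eq_map, List.map_cons, List.map_map]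
    refine congrArg₂ List.cons (by simp) ?_
    apply List.map_congr_left
    intro a _
    simp only [Function.comp]
    rw [show pos + 1 + a = pos + (a + 1) from by omega]

theorem pvCollectDels_len (m : Nat) : ∀ (l : List (List Char)) (pos : Nat),
    (pvCollectDels l pos m).length = m →
    ∀ j, j < m → pos + j < l.length ∧
      PySem.Chars.startswith (l.getD (pos + j) []) ['-'] = true := by
  induction m with
  | zero => intro l pos _ j hj; omega
  | succ m ih =>
    intro l pos h j hj
    rw [pvCollectDels] at h
    by_cases h1 : pos < l.length
    · rw [if_pos h1] at h
      by_cases h2 : PySem.Chars.startswith (l.getD pos []) ['-'] = true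
      · rw [if_pos h2] at h
        simp only [List.length_cons, Nat.add_right_cancel_iff] at h
        match j with
        | 0 => exact ⟨by omega, by simpa using h2⟩
        | Nat.succ j' =>
          have := ih l (pos + 1) h j' (by omega)
          rw [show pos + 1 + j' = pos + (j' + 1) by omega] at this
          exact this
      · rw [if_neg h2] at h; simp at h
    · rw [if_neg h1] at h; simp at h

theorem pv_replace_nil : PySem.Chars.replace ([] : List Char) ['-'] ['='] = [] := by decide

theorem pvFormatDels_getD (m : Nat) : ∀ (l : List (List Char)) (pos j : Nat),
    (pvFormatDels l pos m).getD j [] =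
      if pos ≤ j ∧ j < pos + m then PySem.Chars.replace (l.getD j []) ['-'] ['='] else l.getD j [] := by
  induction m with
  | zero => intro l pos j; rw [if_neg (by omega)]; rfl
  | succ m ih =>
    intro l pos j
    rw [pvFormatDels]
    rw [ih]
    by_cases hp : pos < l.length
    · by_cases hj : j = pos
      · subst hj
        rw [if_neg (by omega), if_pos (by omega)]
        rw [List.getD_eq_getElem _ _ (by simpa using hp)]
        rw [List.getElem_set_self]
      · by_cases hin : pos + 1 ≤ j ∧ j < pos + 1 + m
        · rw [if_pos hin, if_pos (by omega)]
          congr 1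
          by_cases hjl : j < l.length
          · rw [List.getD_eq_getElem _ _ (by simpa using hjl),
              List.getD_eq_getElem _ _ hjl, List.getElem_set_ne (by omega)]
          · rw [List.getD_eq_default _ _ (by simpa using (by omega : l.length ≤ j)),
              List.getD_eq_default _ _ (by omega)]
        · rw [if_neg hin, if_neg (by omega)]
          by_cases hjl : j < l.length
          · rw [List.getD_eq_getElem _ _ (by simpa using hjl),
              List.getD_eq_getElem _ _ hjl, List.getElem_set_ne (by omega)]
          · rw [List.getD_eq_default _ _ (by simpa using (by omega : l.length ≤ j)),
              List.getD_eq_default _ _ (by omega)]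
    · rw [List.set_eq_of_length_le (by omega)]
      by_cases hin : pos + 1 ≤ j ∧ j < pos + 1 + m
      · rw [if_pos hin, if_pos (by omega)]
      · rw [if_neg hin]
        by_cases hj : j = pos
        · subst hj
          rw [if_pos (by omega)]
          rw [List.getD_eq_default _ _ (by omega), pv_replace_nil]
        · rw [if_neg (by omega)]

theorem pvDelRunEnd_eq (T : List (List Char)) (c : Nat) : ∀ (p : Nat),
    (∀ r, p ≤ r → r < p + c → r < T.length ∧ PySem.Chars.startswith (T.getD r []) ['-'] = true) →
    ¬ (p + c < T.length ∧ PySem.Chars.startswith (T.getD (p + c) []) ['-'] = true) →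
    pvDelRunEnd T p = p + c := by
  induction c with
  | zero =>
    intro p _ hstop
    rw [pvDelRunEnd, dif_neg (by simpa using hstop)]
    omega
  | succ c ih =>
    intro p hrun hstop
    rw [pvDelRunEnd, dif_pos (hrun p (by omega) (by omega))]
    rw [ih (p + 1) (fun r hr1 hr2 => hrun r (by omega) (by omega))
      (by rw [show p + 1 + c = p + (c + 1) from by omega]; exact hstop)]
    omega

theorem pvDelRunEnd_le (T : List (List Char)) : ∀ (p : Nat), p ≤ pvDelRunEnd T p := by
  intro p
  fun_induction pvDelRunEnd T p with
  | case1 q h ih => omega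
  | case2 q h => omega

theorem pv_getD_set_ne (l : List (List Char)) (i j : Nat) (v : List Char) (h : j ≠ i) :
    (l.set i v).getD j [] = l.getD j [] := by
  by_cases hj : j < l.length
  · rw [List.getD_eq_getElem _ _ (by simpa using hj), List.getD_eq_getElem _ _ hj,
      List.getElem_set_ne (by omega)]
  · rw [List.getD_eq_default _ _ (by simpa using (by omega : l.length ≤ j)),
      List.getD_eq_default _ _ (by omega)]

theorem pv_check_iff (T l : List (List Char)) (i : Nat)
    (hlen : l.length = T.length) (hi : i < T.length)
    (htail : ∀ j, i ≤ j → j < T.length → l.getD j [] = T.getD (T.length - 1 - j) [])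
    (hplus : PySem.Chars.startswith (T.getD (T.length - 1 - i) []) ['+'] = true) :
    ((pvInsBases T (T.length - 1 - i)).reverse
        = pvCollectDels l (i + 1) (pvInsBases T (T.length - 1 - i)).reverse.length)
      ↔ pvIsCollapsing T (T.length - 1 - i) = true := by
  set p := T.length - 1 - i with hpdef
  rw [List.length_reverse]
  constructor
  · intro hEq
    have hlenC : (pvCollectDels l (i + 1) (pvInsBases T p).length).length
        = (pvInsBases T p).length := by
      rw [← hEq]; simp
    have hcond := pvCollectDels_len (pvInsBases T p).length l (i + 1) hlenC
    have hm : (pvInsBases T p).length ≤ p := by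
      rcases Nat.eq_zero_or_pos (pvInsBases T p).length with h0 | hpos
      · omega
      · have := (hcond ((pvInsBases T p).length - 1) (by omega)).1
        omega
    rw [pvCollectDels_eq (pvInsBases T p).length l (i + 1) hcond] at hEq
    rw [pvIsCollapsing_iff T p hplus]
    refine ⟨hm, fun k hk => ?_⟩
    have hj : (pvInsBases T p).length - 1 - k < (pvInsBases T p).length := by omega
    have hgd : (pvInsBases T p).reverse.getD ((pvInsBases T p).length - 1 - k) []
        = (List.map (fun j => pvLstrip '-' (l.getD (i + 1 + j) []))
            (List.range (pvInsBases T p).length)).getD ((pvInsBases T p).length - 1 - k) [] := by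
      rw [hEq]
    rw [List.getD_eq_getElem _ _ (by simpa using hj),
      List.getD_eq_getElem _ _ (by simpa using hj)] at hgd
    rw [List.getElem_reverse, List.getElem_map, List.getElem_range] at hgd
    have hidx : (pvInsBases T p).length - 1 - ((pvInsBases T p).length - 1 - k) = k := by omega
    simp only [hidx] at hgd
    have hlt : i + 1 + ((pvInsBases T p).length - 1 - k) < T.length := by
      have := (hcond ((pvInsBases T p).length - 1 - k) hj).1; omega
    have harr : T.length - 1 - (i + 1 + ((pvInsBases T p).length - 1 - k))
        = p - (pvInsBases T p).length + k := by omega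
    have hT : l.getD (i + 1 + ((pvInsBases T p).length - 1 - k)) []
        = T.getD (p - (pvInsBases T p).length + k) [] := by
      rw [htail (i + 1 + ((pvInsBases T p).length - 1 - k)) (by omega) hlt, harr]
    constructor
    · rw [← hT]; exact (hcond ((pvInsBases T p).length - 1 - k) hj).2
    · rw [← hT, List.getD_eq_getElem _ _ hk]
      exact hgd.symm
  · intro hcol
    obtain ⟨hm, hall⟩ := (pvIsCollapsing_iff T p hplus).mp hcol
    have hcond : ∀ j, j < (pvInsBases T p).length → i + 1 + j < l.length ∧
        PySem.Chars.startswith (l.getD (i + 1 + j) []) ['-'] = true := by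
      intro j hj
      have hlt : i + 1 + j < T.length := by omega
      have harr : T.length - 1 - (i + 1 + j)
          = p - (pvInsBases T p).length + ((pvInsBases T p).length - 1 - j) := by omega
      refine ⟨by omega, ?_⟩
      rw [htail (i + 1 + j) (by omega) hlt, harr]
      exact (hall ((pvInsBases T p).length - 1 - j) (by omega)).1
    rw [pvCollectDels_eq (pvInsBases T p).length l (i + 1) hcond]
    apply List.ext_getElem (by simp)
    intro j h1 h2
    simp only [List.length_reverse] at h1
    rw [List.getElem_reverse, List.getElem_map, List.getElem_range]
    have hlt : i + 1 + j < T.length := by omega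
    have harr : T.length - 1 - (i + 1 + j)
        = p - (pvInsBases T p).length + ((pvInsBases T p).length - 1 - j) := by omega
    rw [htail (i + 1 + j) (by omega) hlt, harr]
    have := (hall ((pvInsBases T p).length - 1 - j) (by omega)).2
    rw [List.getD_eq_getElem _ _ (by omega : (pvInsBases T p).length - 1 - j < (pvInsBases T p).length)] at this
    exact this.symm

theorem pvRender_collapse (T : List (List Char)) (p : Nat) (h : pvIsCollapsing T p = true) :
    pvRender T p = (PySem.Chars.splitOn (T.getD p []) ['|']).getLastD [] := by
  unfold pvRender
  rw [if_pos h]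

theorem pvRender_consumed (T : List (List Char)) (p k : Nat)
    (h : pvIsCollapsing T p = true) (hk1 : 1 ≤ k) (hk2 : k ≤ (pvInsBases T p).length) :
    pvRender T (p - k) = PySem.Chars.replace (T.getD (p - k) []) ['-'] ['='] := by
  obtain ⟨hplt, hplus⟩ := pvIsCollapsing_lt T p h
  obtain ⟨hm, hall⟩ := (pvIsCollapsing_iff T p hplus).mp h
  have hminus : PySem.Chars.startswith (T.getD (p - k) []) ['-'] = true := by
    have := hall ((pvInsBases T p).length - k) (by omega)
    rw [show p - (pvInsBases T p).length + ((pvInsBases T p).length - k) = p - k from by omega] at this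
    exact this.1
  have hncol : pvIsCollapsing T (p - k) = false :=
    pv_ncol_of_nplus _ _ (pv_sw_exclusive _ '-' '+' (by decide) hminus)
  have hq : pvDelRunEnd T (p - k) = p := by
    have hmain := pvDelRunEnd_eq T k (p - k) (fun r hr1 hr2 => by
        have hkr : r = p - (pvInsBases T p).length + ((pvInsBases T p).length - (p - r)) := by omega
        have := hall ((pvInsBases T p).length - (p - r)) (by omega)
        exact ⟨by omega, by rw [hkr]; exact this.1⟩)
      (by
        rw [show p - k + k = p from by omega]
        rintro ⟨_, hc⟩
        rw [pv_sw_exclusive _ '+' '-' (by decide) hplus] at hc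
        exact absurd hc (by simp))
    rw [show p - k + k = p from by omega] at hmain
    exact hmain
  unfold pvRender
  rw [if_neg (by rw [hncol]; simp), if_pos hminus, hq,
    if_pos ⟨hplt, h, by omega⟩]

theorem pvRender_skip (T : List (List Char)) (i : Nat) (hi : i < T.length)
    (hNS : pvNS T i) (hncol : pvIsCollapsing T (T.length - 1 - i) = false) :
    pvRender T (T.length - 1 - i) = T.getD (T.length - 1 - i) [] := by
  set p := T.length - 1 - i with hpdef
  unfold pvRender
  rw [if_neg (by rw [hncol]; simp)]
  by_cases hminus : PySem.Chars.startswith (T.getD p []) ['-'] = true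
  · rw [if_pos hminus]
    have hguard : ¬ (pvDelRunEnd T p < T.length ∧ pvIsCollapsing T (pvDelRunEnd T p) = true ∧
        pvDelRunEnd T p - p ≤ (pvInsBases T (pvDelRunEnd T p)).length) := by
      rintro ⟨hqlt, hqcol, hqle⟩
      have hq1 : p + 1 ≤ pvDelRunEnd T p := by
        rw [pvDelRunEnd, dif_pos ⟨by omega, hminus⟩]
        exact pvDelRunEnd_le T (p + 1)
      have hj : T.length - 1 - (T.length - 1 - pvDelRunEnd T p) = pvDelRunEnd T p := by omega
      have hns := hNS (T.length - 1 - pvDelRunEnd T p) (by omega) (by rw [hj]; exact hqcol)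
      rw [hj] at hns
      omega
    rw [if_neg hguard]
  · rw [if_neg hminus]

theorem pv_finish (T l : List (List Char)) (hlen : l.length = T.length)
    (hall : ∀ j, j < T.length → l.getD j [] = pvRender T (T.length - 1 - j)) :
    l = (List.range T.length).map (fun j => pvRender T (T.length - 1 - j)) := by
  apply List.ext_getElem (by simp [hlen])
  intro j h1 h2
  have := hall j (by omega)
  rw [List.getD_eq_getElem _ _ h1] at this
  simp only [List.getElem_map, List.getElem_range]
  exact this

theorem pvALoop_eq (T : List (List Char)) :
    ∀ (d i : Nat) (l : List (List Char)), T.length - i ≤ d → l.length = T.length →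
    (∀ j, i ≤ j → j < T.length → l.getD j [] = T.getD (T.length - 1 - j) []) →
    (∀ j, j < i → j < T.length → l.getD j [] = pvRender T (T.length - 1 - j)) →
    pvNS T i →
    pvALoop l i = (List.range T.length).map (fun j => pvRender T (T.length - 1 - j)) := by
  intro d
  induction d with
  | zero =>
    intro i l hd hlen htail hout hNS
    rw [pvALoop, dif_neg (by omega)]
    exact pv_finish T l hlen (fun j hj => hout j (by omega) hj)
  | succ d ih =>
    intro i l hd hlen htail hout hNS
    by_cases hi : i < T.length
    case neg =>
      rw [pvALoop, dif_neg (by omega)]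
      exact pv_finish T l hlen (fun j hj => hout j (by omega) hj)
    case pos =>
    have hcur : l.getD i [] = T.getD (T.length - 1 - i) [] := htail i (le_refl i) hi
    rw [pvALoop, dif_pos (by omega)]
    by_cases hplus : PySem.Chars.startswith (l.getD i []) ['+'] = false
    · rw [if_pos hplus]
      have hncol : pvIsCollapsing T (T.length - 1 - i) = false :=
        pv_ncol_of_nplus _ _ (by rw [← hcur]; exact hplus)
      apply ih (i + 1) l (by omega) hlen (fun j h1 h2 => htail j (by omega) h2)
      · intro j hj1 hj2
        by_cases hji : j = i
        · subst hji
          rw [hcur, pvRender_skip T j hj2 hNS hncol]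
        · exact hout j (by omega) hj2
      · intro j hj hcol
        by_cases hji : j = i
        · subst hji
          rw [hncol] at hcol
          exact absurd hcol (by simp)
        · exact Nat.lt_succ_of_lt (hNS j (by omega) hcol)
    · rw [if_neg hplus]
      rw [hcur]
      have hplus' : PySem.Chars.startswith (T.getD (T.length - 1 - i) []) ['+'] = true := by
        rw [← hcur]; simpa using hplus
      rw [show ((PySem.Chars.splitOn (T.getD (T.length - 1 - i) []) ['|']).dropLast).map (pvLstrip '+')
            = pvInsBases T (T.length - 1 - i) from rfl]
      by_cases hck : (pvInsBases T (T.length - 1 - i)).reverse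
          = pvCollectDels l (i + 1) (pvInsBases T (T.length - 1 - i)).reverse.length
      · rw [if_neg (by simpa using hck)]
        have hcol : pvIsCollapsing T (T.length - 1 - i) = true :=
          (pv_check_iff T l i hlen hi htail hplus').mp hck
        obtain ⟨hm, hall⟩ := (pvIsCollapsing_iff T (T.length - 1 - i) hplus').mp hcol
        rw [List.length_reverse]
        apply ih (i + (pvInsBases T (T.length - 1 - i)).length + 1) _ (by omega)
        · rw [pvFormatDels_length, List.length_set, hlen]
        · intro j h1 h2
          rw [pvFormatDels_getD, if_neg (by omega), pv_getD_set_ne _ _ _ _ (by omega)]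
          exact htail j (by omega) h2
        · intro j h1 h2
          by_cases hjlt : j < i
          · rw [pvFormatDels_getD, if_neg (by omega), pv_getD_set_ne _ _ _ _ (by omega)]
            exact hout j hjlt h2
          by_cases hji : j = i
          · subst hji
            rw [pvFormatDels_getD, if_neg (by omega)]
            rw [List.getD_eq_getElem _ _ (by rw [List.length_set]; omega), List.getElem_set_self,
              pvRender_collapse T _ hcol]
          · -- i + 1 ≤ j ≤ i + m
            rw [pvFormatDels_getD, if_pos (by omega), pv_getD_set_ne _ _ _ _ (by omega)]
            rw [htail j (by omega) h2]
            rw [show T.length - 1 - j = (T.length - 1 - i) - (j - i) from by omega]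
            exact (pvRender_consumed T (T.length - 1 - i) (j - i) hcol (by omega) (by omega)).symm
        · intro j hj hcol2
          by_cases hjlt : j < i
          · have := hNS j hjlt hcol2; omega
          by_cases hji : j = i
          · subst hji; omega
          · -- i < j ≤ i + m : position T.length-1-j starts with '-', cannot collapse
            exfalso
            have hk : T.length - 1 - j
                = (T.length - 1 - i) - (pvInsBases T (T.length - 1 - i)).length
                  + ((pvInsBases T (T.length - 1 - i)).length - (j - i)) := by omega
            have hmin := (hall ((pvInsBases T (T.length - 1 - i)).length - (j - i)) (by omega)).1
            rw [← hk] at hmin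
            have := pv_ncol_of_nplus T (T.length - 1 - j)
              (pv_sw_exclusive _ '-' '+' (by decide) hmin)
            rw [this] at hcol2
            exact absurd hcol2 (by simp)
      · rw [if_pos (by simpa using hck)]
        have hncol : pvIsCollapsing T (T.length - 1 - i) = false := by
          rw [Bool.eq_false_iff]
          intro hc
          exact hck ((pv_check_iff T l i hlen hi htail hplus').mpr hc)
        apply ih (i + 1) l (by omega) hlen (fun j h1 h2 => htail j (by omega) h2)
        · intro j hj1 hj2
          by_cases hji : j = i
          · subst hji
            rw [hcur, pvRender_skip T j hj2 hNS hncol]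
          · exact hout j (by omega) hj2
        · intro j hj hcol
          by_cases hji : j = i
          · subst hji
            rw [hncol] at hcol
            exact absurd hcol (by simp)
          · exact Nat.lt_succ_of_lt (hNS j (by omega) hcol)

theorem pv_rev_map_range (T : List (List Char)) :
    ((List.range T.length).map (fun j => pvRender T (T.length - 1 - j))).reverse
      = (List.range T.length).map (pvRender T) := by
  apply List.ext_getElem (by simp)
  intro p h1 h2
  simp only [List.length_reverse, List.length_map, List.length_range] at h1
  rw [List.getElem_reverse, List.getElem_map, List.getElem_map, List.getElem_range,
    List.getElem_range]
  congr 1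
  simp only [List.length_map, List.length_range]
  omega

-- ===== VERDICT (by name: the statement is the Claim_ definition above) =====
theorem convert_consecutive_indels_to_match_spec : Claim_equal_convert_consecutive_indels_to_match := by
  intro cssplit _
  unfold Spec_convert_consecutive_indels_to_match
  unfold convert_consecutive_indels_to_match convert_consecutive_indels_to_match_alt
  have hmain := pvALoop_eq (PySem.Chars.splitOn cssplit.toList [','])
    (PySem.Chars.splitOn cssplit.toList [',']).length 0
    (PySem.Chars.splitOn cssplit.toList [',']).reverse
    (by omega) (by simp)
    (fun j h1 h2 => by
      rw [List.getD_eq_getElem _ _ (by rw [List.length_reverse]; omega),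
        List.getD_eq_getElem _ _ (by omega), List.getElem_reverse])
    (fun j h1 h2 => absurd h1 (by omega))
    (fun j hj _ => absurd hj (by omega))
  show String.mk (PySem.Chars.join [','] (pvALoop (PySem.Chars.splitOn cssplit.toList [',']).reverse 0).reverse)
      = String.mk (PySem.Chars.join [','] ((List.range (PySem.Chars.splitOn cssplit.toList [',']).length).map (pvRender (PySem.Chars.splitOn cssplit.toList [',']))))
  rw [hmain, pv_rev_map_range]
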